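/- GENERATED by mk_final_copies.py from the proof of the farm's unit `start_decoder.C2a` (farm:start_decoder.C2a.1: Proof.lean) as the
   re-elaboration sweep compiled it — do not edit. -/
import Asan.CheckWalk
import Vorbis.Spec.Units.start_decoder_C2a
import Vorbis.Spec.Worked.start_decoder_C2a_Lemmas
open X86 X86.User Asan Vorbis Vorbis.Spec Vorbis.Spec.StartDecoder

set_option maxRecDepth 4000
set_option maxHeartbeats 4000000

namespace Vorbis.Spec.start_decoder_C2a

/-- The seven fields of the book at `c` that segment C2 never stores are still 0: `lookup_type` (at `c + 25`) lies in the zero bytes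
`[c + 8, c + 27)`, the six others (`lookup_values`, `multiplicands`, `codewords`, `sorted_codewords`, `sorted_values`,
`sorted_entries`) in the zero bytes `[c + 28, c + 2120)`. -/
theorem c2a_fresh7 {mem : Mem} {c : Nat} (hlo : ZeroFill mem (c + 8) 19) (hhi : ZeroFill mem (c + 28) 2092) :
    Fresh7 mem c := by
  refine
    { lookup_type := ?_
      lookup_values := ?_
      multiplicands := ?_
      sorted_codewords := ?_
      sorted_values := ?_
      codewords := ?_
      sorted_entries := ?_ }
  · simp only [vacc, voff]
    exact hlo.u8 _ (by omega) (by omega)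
  · simp only [vacc, voff]
    exact hhi.u32 _ (by omega) (by omega)
  · simp only [vacc, voff]
    exact hhi.u64 _ (by omega) (by omega)
  · simp only [vacc, voff]
    exact hhi.u64 _ (by omega) (by omega)
  · simp only [vacc, voff]
    exact hhi.u64 _ (by omega) (by omega)
  · simp only [vacc, voff]
    exact hhi.u64 _ (by omega) (by omega)
  · simp only [vacc, voff]
    exact hhi.i32 _ (by omega) (by omega)

/-- `codeword_lengths` (the pointer at `c + 8`) of the book under construction is still NULL: it lies in the zero bytes
`[c + 8, c + 27)`. -/
theorem c2a_lengths_null {mem : Mem} {c : Nat} (hlo : ZeroFill mem (c + 8) 19) : Codebook.codeword_lengths mem c = 0 := by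
  simp only [vacc, voff]
  exact hlo.u64 _ (by omega) (by omega)

/-- **The bridge at `cut90`** (0x1143aa): the worker's assertion `In3` (with the result bound 2 of `ordered = get_bits(f, 1)`) is the
tree's `InC2b` — `Frame`, CUR(i) whose head-of-iteration snapshot is the current arena `A.1`, no temp block, the book fresh but for
`dimensions` and `entries`, `eax < 2`. -/
theorem c2a_bridge {u₀ : State} {g : Ghost} {i : Nat} {A2 A3 : Arena} {A : Arena × List Obj} {w : State}
    (h : In3 u₀ g i A2 A3 A Vorbis.L.start_decoder.cut90 2 w) : InC2b u₀ g i A2 A3 A w :=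
  { frame := h.frame
    cur :=
      { sd := h.carry.sdw
        hand := h.hand
        ages := h.carry.ages
        zf := h.carry.zf
        lt := h.lt
        slot_f := h.carry.slot_f
        slot_i := h.carry.slot_i
        r14 := h.r14 }
    noTemps := h.noTemps
    fresh := c2a_fresh7 h.carry.fresh_lo h.carry.fresh_hi
    cl0 := c2a_lengths_null h.carry.fresh_lo
    dim_nonneg := h.dim_nonneg
    dim_le := h.dim_le
    ent_nonneg := h.ent_nonneg
    ent_lt := h.ent_lt
    rax := h.rax }

end Vorbis.Spec.start_decoder_C2a

/-- Segment C2a of `start_decoder`: from the head of the codebook loop (0x114298) to `AtC16`, the epilogue `AtERR`, or the return of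
`ordered = get_bits(f, 1)` (`cut90`, 0x1143aa) with `AtC2b` (`Lemmas.lean`: `to_cut90`; the bridge `c2a_bridge`). -/
theorem Vorbis.Spec.Worked.start_decoder_C2a_ok : Vorbis.Spec.start_decoder_C2a.Statement := by
  intro Lay hLay μ hμ u₀ hcode hld4 hld8 h_get_bits hst4 h_error g i v hat
  refine (Vorbis.Spec.start_decoder_C2a.to_cut90 hLay hμ hcode hld4 hld8 h_get_bits hst4 h_error g i v hat).mono ?_
  intro w hw
  rcases hw with h16 | herr | ⟨A, A2, A3, h3⟩
  · exact Or.inl h16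
  · exact Or.inr (Or.inl herr)
  · exact Or.inr (Or.inr ⟨A, A2, A3, Vorbis.Spec.start_decoder_C2a.c2a_bridge h3⟩)
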